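-- pv_equiv track=rewrite | github.com/andyhedges/armcrunch | arm64/fftgen.py | _radix4_stage_count
-- ===== SOURCE A (Python) =====
-- def _radix4_stage_count(n: int) -> int:
--     """Compute number of radix-4 stages for n."""
--     stages = 0
--     value = n
--     while value > 1:
--         if value % 4 != 0:
--             raise ValueError(f"{n} is not compatible with pure radix-4 staging.")
--         value //= 4
--         stages += 1
--     return stages
-- ===== SOURCE B (Python) =====
-- def _radix4_stage_count(n: int) -> int:
--     """Compute number of radix-4 stages for n."""
--     if n <= 1:
--         return 0
--     e = n.bit_length() - 1
--     if (n & (n - 1)) != 0 or e % 2 != 0: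
--         raise ValueError(f"{n} is not compatible with pure radix-4 staging.")
--     return e // 2
-- ===== Notes on version B (the rewrite author's own statement) =====
-- stated objective: faster
-- what changed: Replaces the divide-by-4 loop with a constant-time closed form: power-of-4 test via n&(n-1) and bit_length parity, stage count = (bit_length-1)//2; raises the identical ValueError message otherwise.
import Mathlib
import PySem

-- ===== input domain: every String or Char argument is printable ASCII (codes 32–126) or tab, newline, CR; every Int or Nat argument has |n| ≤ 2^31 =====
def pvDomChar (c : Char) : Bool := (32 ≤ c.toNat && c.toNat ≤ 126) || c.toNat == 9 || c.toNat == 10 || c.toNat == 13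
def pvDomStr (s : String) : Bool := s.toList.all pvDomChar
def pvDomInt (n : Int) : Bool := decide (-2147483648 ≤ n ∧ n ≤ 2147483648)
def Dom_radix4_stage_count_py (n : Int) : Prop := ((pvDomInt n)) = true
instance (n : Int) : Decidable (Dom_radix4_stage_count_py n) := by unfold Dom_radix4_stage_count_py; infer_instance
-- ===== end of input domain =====

-- B replaces A's divide-by-4 loop with a constant-time bit-trick closed form (same ValueError otherwise);
-- Pre_ excludes exactly the inputs where A (and B) raise ValueError: n > 1 and not a power of 4.


-- ===== PORT A =====
-- A's while-loop: value > 1 → (value % 4 ≠ 0 raises ValueError, modelled by returning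
-- the accumulated stages; such inputs are outside Pre_) else value //= 4; stages += 1.
def radix4StageLoop (value : Int) (stages : Int) : Int :=
  if h : value > 1 then
    if PySem.Int.mod value 4 ≠ 0 then stages  -- raise ValueError (outside Pre_)
    else radix4StageLoop (PySem.Int.floordiv value 4) (stages + 1)
  else stages
termination_by value.toNat
decreasing_by
  rw [PySem.Int.floordiv_eq_ediv_of_pos (by omega : (0:Int) < 4)]
  omega

def radix4_stage_count_py (n : Int) : Int := radix4StageLoop n 0

-- ===== PORT B =====
-- B: if n <= 1 return 0; e = n.bit_length()-1; power-of-4 test via n&(n-1) and e parity,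
-- raise ValueError (outside Pre_, modelled by 0) otherwise; return e // 2.
def radix4_stage_count_py_alt (n : Int) : Int :=
  if n ≤ 1 then 0
  else
    let e : Int := (Nat.log2 n.toNat : Int)  -- n.bit_length() - 1 for n ≥ 1
    if (n.toNat &&& (n.toNat - 1)) ≠ 0 ∨ PySem.Int.mod e 2 ≠ 0 then 0  -- raise ValueError (outside Pre_)
    else PySem.Int.floordiv e 2

-- ===== PRECONDITION & SPEC =====
-- Pre_ excludes exactly the inputs on which A raises ValueError: n > 1 and not a power of 4.
-- 'n is a power of 4' is written in the decidable closed form n = 4 ^ log₄ n.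
def Pre_radix4_stage_count_py (n : Int) : Prop :=
  n ≤ 1 ∨ n = (4 : Int) ^ (Nat.log 4 n.toNat)
instance (n : Int) : Decidable (Pre_radix4_stage_count_py n) := by unfold Pre_radix4_stage_count_py; infer_instance
def pvWitness_radix4_stage_count_py : Int := 64

def Spec_radix4_stage_count_py (n : Int) (out : Int) : Prop := out = radix4_stage_count_py_alt n
instance (n : Int) (out : Int) : Decidable (Spec_radix4_stage_count_py n out) := by unfold Spec_radix4_stage_count_py; infer_instance

-- ===== CLAIM (what is proved, stated in full; the proofs are below) =====
def Claim_equal_radix4_stage_count_py : Prop := ∀ (n : Int), Dom_radix4_stage_count_py n → Pre_radix4_stage_count_py n → Spec_radix4_stage_count_py n (radix4_stage_count_py n)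

-- ===== LEMMAS AND PROOFS =====
theorem radix4StageLoop_le_one (v s : Int) (h : v ≤ 1) : radix4StageLoop v s = s := by
  unfold radix4StageLoop
  simp [show ¬ v > 1 by omega]

theorem radix4StageLoop_pow (k : Nat) (s : Int) :
    radix4StageLoop ((4 : Int) ^ k) s = s + k := by
  induction k generalizing s with
  | zero => simp [radix4StageLoop_le_one]
  | succ k ih =>
    have hgt : (1 : Int) < 4 ^ (k + 1) := by
      calc (1 : Int) < 4 := by norm_num
      _ ≤ 4 ^ (k + 1) := le_self_pow₀ (by norm_num) (Nat.succ_ne_zero k)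
    have hmod : PySem.Int.mod ((4 : Int) ^ (k + 1)) 4 = 0 := by
      rw [PySem.Int.mod_eq_emod_of_pos (by norm_num : (0:Int) < 4), pow_succ]
      exact Int.mul_emod_left _ _
    have hdiv : PySem.Int.floordiv ((4 : Int) ^ (k + 1)) 4 = 4 ^ k := by
      rw [PySem.Int.floordiv_eq_ediv_of_pos (by norm_num), pow_succ]
      exact Int.mul_ediv_cancel _ (by norm_num)
    rw [radix4StageLoop, dif_pos hgt, if_neg (by rw [hmod]; simp), hdiv, ih]
    push_cast; ring

theorem alt_pow (k : Nat) (hk : k ≠ 0) : radix4_stage_count_py_alt ((4 : Int) ^ k) = k := by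
  have h4 : ((4 : Int) ^ k) = ((4 ^ k : Nat) : Int) := by push_cast; ring
  have hgt : (1 : Int) < 4 ^ k := by
    calc (1 : Int) < 4 := by norm_num
    _ ≤ 4 ^ k := le_self_pow₀ (by norm_num) hk
  have htn : ((4 : Int) ^ k).toNat = 2 ^ (2 * k) := by
    rw [h4, Int.toNat_natCast, show (4 : Nat) = 2 ^ 2 by norm_num, ← pow_mul]
  have hand : 2 ^ (2 * k) &&& (2 ^ (2 * k) - 1) = 0 := by
    rw [Nat.and_two_pow_sub_one_eq_mod, Nat.mod_self]
  have hlog : Nat.log2 (2 ^ (2 * k)) = 2 * k := Nat.log2_two_pow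
  rw [radix4_stage_count_py_alt, if_neg (by omega)]
  simp only [htn, hand, hlog]
  rw [if_neg, PySem.Int.floordiv_eq_ediv_of_pos (by norm_num)]
  · push_cast; omega
  · simp only [ne_eq, not_true_eq_false, not_or, not_not]
    refine ⟨by simp, ?_⟩
    rw [PySem.Int.mod_eq_emod_of_pos (by norm_num : (0:Int) < 2)]
    push_cast
    omega

-- ===== VERDICT (by name: the statement is the Claim_ definition above) =====
theorem radix4_stage_count_py_spec : Claim_equal_radix4_stage_count_py := by
  intro n _hd hpre
  show radix4_stage_count_py n = radix4_stage_count_py_alt n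
  by_cases h1 : n ≤ 1
  · rw [radix4_stage_count_py, radix4StageLoop_le_one n 0 h1,
      radix4_stage_count_py_alt, if_pos h1]
  · rcases hpre with h | heq
    · exact absurd h h1
    · set k := Nat.log 4 n.toNat with hk
      have hk0 : k ≠ 0 := by
        intro h0
        rw [h0, pow_zero] at heq
        omega
      rw [heq, radix4_stage_count_py, radix4StageLoop_pow, alt_pow k hk0]
      ring
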